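-- pv_equiv track=rewrite | github.com/dgkenn/MeridianV2 | src/evidence/pubmed_harvester.py | _classify_study_design
-- ===== SOURCE A (Python) =====
-- def _classify_study_design(text: str) -> str:
--     """Classify study design from text."""
--     text_lower = text.lower()
--
--     if any(term in text_lower for term in ["systematic review", "meta-analysis"]):
--         if "meta-analysis" in text_lower:
--             return "meta-analysis"
--         return "systematic review"
--     elif any(term in text_lower for term in ["randomized", "randomised", "rct"]):
--         return "randomized controlled trial"
--     elif any(term in text_lower for term in ["prospective", "cohort"]):
--         return "prospective cohort"
--     elif any(term in text_lower for term in ["retrospective", "case-control"]):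
--         if "case-control" in text_lower:
--             return "case-control"
--         return "retrospective cohort"
--     elif "cross-sectional" in text_lower:
--         return "cross-sectional"
--     elif "case series" in text_lower:
--         return "case series"
--     elif "case report" in text_lower:
--         return "case report"
--     else:
--         return "observational"
-- ===== SOURCE B (Python) =====
-- _KEYWORDS = [
--     ("meta-analysis", 0), ("systematic review", 1),
--     ("randomized", 2), ("randomised", 2), ("rct", 2),
--     ("prospective", 3), ("cohort", 3),
--     ("case-control", 4), ("retrospective", 5),
--     ("cross-sectional", 6), ("case series", 7), ("case report", 8),
-- ]
-- _LABELS = ["meta-analysis", "systematic review", "randomized controlled trial",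
--            "prospective cohort", "case-control", "retrospective cohort",
--            "cross-sectional", "case series", "case report"]
--
-- def _classify_study_design(text: str) -> str:
--     """Classify study design from text."""
--     t = text.lower()
--     best = len(_LABELS)
--     for i in range(len(t)):
--         for kw, rank in _KEYWORDS:
--             if rank < best and t.startswith(kw, i):
--                 best = rank
--     return _LABELS[best] if best < len(_LABELS) else "observational"
-- ===== Notes on version B (the rewrite author's own statement) =====
-- stated objective: alternative
-- what changed: Replaces A's if/elif chain of independent `in` substring searches by a single left-to-right scan over text positions that maintains the minimum priority rank of any keyword starting there, then indexes a label table with the best rank.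
import Mathlib
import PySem

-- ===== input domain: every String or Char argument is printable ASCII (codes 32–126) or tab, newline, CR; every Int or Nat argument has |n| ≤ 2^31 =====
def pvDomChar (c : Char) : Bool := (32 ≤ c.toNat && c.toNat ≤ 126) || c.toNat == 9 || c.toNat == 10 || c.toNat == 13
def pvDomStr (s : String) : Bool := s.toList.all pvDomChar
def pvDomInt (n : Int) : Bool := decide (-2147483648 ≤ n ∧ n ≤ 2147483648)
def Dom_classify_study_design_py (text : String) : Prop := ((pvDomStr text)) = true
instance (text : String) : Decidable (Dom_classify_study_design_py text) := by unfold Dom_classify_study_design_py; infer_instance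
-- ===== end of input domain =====

-- B replaces A's chain of independent substring searches by a single left-to-right scan
-- over text positions maintaining the minimum priority rank of any matching keyword
-- (objective: alternative algorithm, same asymptotic cost).

-- ===== PORT A =====
def classify_study_design_py (text : String) : String :=
  let text_lower := PySem.Str.lower text
  if ["systematic review", "meta-analysis"].any (fun term => PySem.Str.isIn term text_lower) then
    if PySem.Str.isIn "meta-analysis" text_lower then "meta-analysis"
    else "systematic review"
  else if ["randomized", "randomised", "rct"].any (fun term => PySem.Str.isIn term text_lower) then
    "randomized controlled trial"
  else if ["prospective", "cohort"].any (fun term => PySem.Str.isIn term text_lower) then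
    "prospective cohort"
  else if ["retrospective", "case-control"].any (fun term => PySem.Str.isIn term text_lower) then
    if PySem.Str.isIn "case-control" text_lower then "case-control"
    else "retrospective cohort"
  else if PySem.Str.isIn "cross-sectional" text_lower then "cross-sectional"
  else if PySem.Str.isIn "case series" text_lower then "case series"
  else if PySem.Str.isIn "case report" text_lower then "case report"
  else "observational"

-- ===== PORT B =====
-- flattened (keyword, priority rank) table of Source B
def bKeywords : List (List Char × Nat) :=
  [ ("meta-analysis".toList, 0), ("systematic review".toList, 1),
    ("randomized".toList, 2), ("randomised".toList, 2), ("rct".toList, 2),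
    ("prospective".toList, 3), ("cohort".toList, 3),
    ("case-control".toList, 4), ("retrospective".toList, 5),
    ("cross-sectional".toList, 6), ("case series".toList, 7), ("case report".toList, 8) ]

def bLabels : List String :=
  ["meta-analysis", "systematic review", "randomized controlled trial",
   "prospective cohort", "case-control", "retrospective cohort",
   "cross-sectional", "case series", "case report"]

-- inner loop of Source B at one position: t.startswith(kw, i) on the suffix
def bStep (s : List Char) (best : Nat) : Nat :=
  bKeywords.foldl (fun best p => if p.2 < best ∧ p.1.isPrefixOf s = true then p.2 else best) best

-- outer loop of Source B: positions i = suffixes of the char list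
def bScan : List Char → Nat → Nat
  | [], best => best
  | c :: rest, best => bScan rest (bStep (c :: rest) best)

def classify_study_design_py_alt (text : String) : String :=
  let t := (PySem.Str.lower text).toList
  let best := bScan t bLabels.length
  if best < bLabels.length then bLabels.getD best "observational" else "observational"

-- ===== PRECONDITION & SPEC =====
def Spec_classify_study_design_py (text : String) (out : String) : Prop := out = classify_study_design_py_alt text
instance (text : String) (out : String) : Decidable (Spec_classify_study_design_py text out) := by unfold Spec_classify_study_design_py; infer_instance

-- ===== CLAIM (what is proved, stated in full; the proofs are below) =====
def Claim_equal_classify_study_design_py : Prop := ∀ (text : String), Dom_classify_study_design_py text → Spec_classify_study_design_py text (classify_study_design_py text)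

-- ===== LEMMAS AND PROOFS =====

-- occurrence: kw is a prefix of some suffix of l (= kw infix of l)
def occ (kw : List Char) : List Char → Bool
  | [] => kw.isEmpty
  | c :: rest => kw.isPrefixOf (c :: rest) || occ kw rest

-- the fold over the keyword table by occurrence, the target shape of bScan
def minf (l : List Char) (b : Nat) : Nat :=
  bKeywords.foldl (fun m p => if occ p.1 l = true then min m p.2 else m) b

lemma ite_min (r b : Nat) (c : Bool) :
    (if r < b ∧ c = true then r else b) = if c = true then min b r else b := by
  cases c <;> simp
  split_ifs <;> omega

lemma foldl_min (L : List (List Char × Nat)) (g : List Char × Nat → Bool) (x r : Nat) :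
    L.foldl (fun m p => if g p = true then min m p.2 else m) (min x r)
      = min (L.foldl (fun m p => if g p = true then min m p.2 else m) x) r := by
  induction L generalizing x with
  | nil => rfl
  | cons p L ih =>
    simp only [List.foldl_cons]
    cases h : g p <;> simp only [Bool.false_eq_true, if_false, if_true]
    · exact ih x
    · rw [min_right_comm, ih]

lemma foldl_or_split (L : List (List Char × Nat)) (g h : List Char × Nat → Bool) (b : Nat) :
    L.foldl (fun m p => if (g p || h p) = true then min m p.2 else m) b
      = L.foldl (fun m p => if h p = true then min m p.2 else m)
          (L.foldl (fun m p => if g p = true then min m p.2 else m) b) := by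
  induction L generalizing b with
  | nil => rfl
  | cons p L ih =>
    simp only [List.foldl_cons]
    cases hg : g p <;> cases hh : h p <;>
        simp only [Bool.or_self, Bool.or_true, Bool.true_or,
          Bool.false_eq_true, if_false, if_true] <;>
      simp only [ih, foldl_min, min_assoc, min_self]

lemma bStep_eq (s : List Char) (b : Nat) :
    bStep s b = bKeywords.foldl (fun m p => if p.1.isPrefixOf s = true then min m p.2 else m) b := by
  unfold bStep
  congr 1
  funext m p
  exact ite_min p.2 m (p.1.isPrefixOf s)

lemma bScan_eq (l : List Char) (b : Nat) : bScan l b = minf l b := by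
  induction l generalizing b with
  | nil => simp [bScan, minf, bKeywords, occ, List.foldl]
  | cons c rest ih =>
    show bScan rest (bStep (c :: rest) b) = minf (c :: rest) b
    rw [ih, bStep_eq]
    unfold minf
    rw [← foldl_or_split]
    have hpt : ∀ (m : Nat) (p : List Char × Nat),
        (if (p.1.isPrefixOf (c :: rest) || occ p.1 rest) = true then min m p.2 else m)
          = (if occ p.1 (c :: rest) = true then min m p.2 else m) := by
      intro m p; simp [occ]
    simp only [hpt]

lemma occ_iff (kw l : List Char) : occ kw l = true ↔ kw <:+: l := by
  induction l with
  | nil => simp [occ, List.isEmpty_iff, List.infix_nil]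
  | cons c rest ih =>
    simp [occ, ih, List.infix_cons_iff, List.isPrefixOf_iff_prefix]

lemma occ_eq_isIn (kw l : List Char) : occ kw l = PySem.Chars.isIn kw l := by
  by_cases h : kw <:+: l
  · rw [(occ_iff kw l).2 h, (PySem.Chars.isIn_iff_infix kw l).2 h]
  · have h1 : occ kw l = false := Bool.eq_false_iff.2 (fun ht => h ((occ_iff kw l).1 ht))
    have h2 : PySem.Chars.isIn kw l = false := (PySem.Chars.isIn_eq_false_iff kw l).2 h
    rw [h1, h2]

lemma foldl_map_pairs (L : List (List Char × Nat)) (l : List Char) (b : Nat) :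
    L.foldl (fun m p => if occ p.1 l = true then min m p.2 else m) b
      = (L.map (fun p => (occ p.1 l, p.2))).foldl
          (fun m (q : Bool × Nat) => if q.1 = true then min m q.2 else m) b := by
  induction L generalizing b with
  | nil => rfl
  | cons p L ih => simp only [List.foldl_cons, List.map_cons]; exact ih _

-- both sides as a function of the twelve occurrence booleans, checked case by case
lemma key (sr ma rz rs rct pr co re cc xs cs cr : Bool) :
    (if (sr || ma) = true then
        if ma = true then "meta-analysis" else "systematic review"
      else if (rz || (rs || rct)) = true then "randomized controlled trial"
      else if (pr || co) = true then "prospective cohort"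
      else if (re || cc) = true then
        if cc = true then "case-control" else "retrospective cohort"
      else if xs = true then "cross-sectional"
      else if cs = true then "case series"
      else if cr = true then "case report"
      else "observational")
      = (if ([(ma, 0), (sr, 1), (rz, 2), (rs, 2), (rct, 2), (pr, 3), (co, 3),
              (cc, 4), (re, 5), (xs, 6), (cs, 7), (cr, 8)].foldl
                (fun m (q : Bool × Nat) => if q.1 = true then min m q.2 else m) 9) < 9 then
          (["meta-analysis", "systematic review", "randomized controlled trial",
            "prospective cohort", "case-control", "retrospective cohort",
            "cross-sectional", "case series", "case report"] : List String).getD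
            ([(ma, 0), (sr, 1), (rz, 2), (rs, 2), (rct, 2), (pr, 3), (co, 3),
              (cc, 4), (re, 5), (xs, 6), (cs, 7), (cr, 8)].foldl
                (fun m (q : Bool × Nat) => if q.1 = true then min m q.2 else m) 9) "observational"
        else "observational") := by
  cases sr <;> cases ma <;> cases rz <;> cases rs <;> cases rct <;> cases pr <;>
    cases co <;> cases re <;> cases cc <;> cases xs <;> cases cs <;> cases cr <;> rfl

-- ===== VERDICT (by name: the statement is the Claim_ definition above) =====
set_option maxHeartbeats 1000000 in
theorem classify_study_design_py_spec : Claim_equal_classify_study_design_py := by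
  intro text _
  unfold Spec_classify_study_design_py classify_study_design_py classify_study_design_py_alt
  simp only [bScan_eq, minf]
  rw [foldl_map_pairs]
  simp only [bKeywords, bLabels, List.map_cons, List.map_nil, occ_eq_isIn,
    List.any_cons, List.any_nil, Bool.or_false, PySem.Str.isIn_eq,
    List.length_cons, List.length_nil]
  exact key
    (PySem.Chars.isIn "systematic review".toList (PySem.Str.lower text).toList)
    (PySem.Chars.isIn "meta-analysis".toList (PySem.Str.lower text).toList)
    (PySem.Chars.isIn "randomized".toList (PySem.Str.lower text).toList)
    (PySem.Chars.isIn "randomised".toList (PySem.Str.lower text).toList)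
    (PySem.Chars.isIn "rct".toList (PySem.Str.lower text).toList)
    (PySem.Chars.isIn "prospective".toList (PySem.Str.lower text).toList)
    (PySem.Chars.isIn "cohort".toList (PySem.Str.lower text).toList)
    (PySem.Chars.isIn "retrospective".toList (PySem.Str.lower text).toList)
    (PySem.Chars.isIn "case-control".toList (PySem.Str.lower text).toList)
    (PySem.Chars.isIn "cross-sectional".toList (PySem.Str.lower text).toList)
    (PySem.Chars.isIn "case series".toList (PySem.Str.lower text).toList)
    (PySem.Chars.isIn "case report".toList (PySem.Str.lower text).toList)
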